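-- pv_equiv track=rewrite | github.com/DRCEDU/Leet_Vibe | programming-languages/python/mail_client_access_fixed.py | _parse_mailbox_list
-- ===== SOURCE A (Python) =====
-- from typing import List, Dict, Optional, Any
--
-- def _parse_mailbox_list(result: str) -> List[Dict[str, str]]:
--     """Parse the mailbox list from AppleScript result."""
--     mailboxes = []
--     if result:
--         # Parse the AppleScript result format
--         lines = result.split('\n')
--         current_mailbox = {}
--         for line in lines:
--             line = line.strip()
--             if line.startswith('name:'):
--                 if current_mailbox:
--                     mailboxes.append(current_mailbox)
--                 current_mailbox = {'name': line.split(':', 1)[1].strip()}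
--             elif line.startswith('account:'):
--                 current_mailbox['account'] = line.split(':', 1)[1].strip()
--             elif line.startswith('unread:'):
--                 current_mailbox['unread'] = line.split(':', 1)[1].strip()
--             elif line.startswith('total:'):
--                 current_mailbox['total'] = line.split(':', 1)[1].strip()
--         if current_mailbox:
--             mailboxes.append(current_mailbox)
--     return mailboxes
-- ===== SOURCE B (Python) =====
-- def _parse_mailbox_list(result):
--     """Two-phase parse: split into stripped lines, group at name-line boundaries
--     (keeping the pre-'name:' lines as a leading group), then build a dict per
--     group and keep the non-empty ones."""
--     if not result:
--         return []
--     lines = [ln.strip() for ln in result.split('\n')]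
--     groups = []
--     current = []
--     for ln in lines:
--         if ln.startswith('name:'):
--             groups.append(current)
--             current = [ln]
--         else:
--             current.append(ln)
--     groups.append(current)
--     fields = (('name', 'name:'), ('account', 'account:'),
--               ('unread', 'unread:'), ('total', 'total:'))
--     mailboxes = []
--     for group in groups:
--         entry = {}
--         for ln in group:
--             for key, prefix in fields:
--                 if ln.startswith(prefix):
--                     entry[key] = ln.split(':', 1)[1].strip()
--         if entry:
--             mailboxes.append(entry)
--     return mailboxes
-- ===== Notes on version B (the rewrite author's own statement) =====
-- stated objective: alternative
-- what changed: Replaces A's single stateful pass (a running dict, flushed at each name line and once more at the end) by a two-phase decomposition: first group the stripped lines into records at name-line boundaries (keeping the lines before the first name line as a leading group), then build each record's dict by a uniform table-driven field scan and keep the non-empty ones.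
import Mathlib
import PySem

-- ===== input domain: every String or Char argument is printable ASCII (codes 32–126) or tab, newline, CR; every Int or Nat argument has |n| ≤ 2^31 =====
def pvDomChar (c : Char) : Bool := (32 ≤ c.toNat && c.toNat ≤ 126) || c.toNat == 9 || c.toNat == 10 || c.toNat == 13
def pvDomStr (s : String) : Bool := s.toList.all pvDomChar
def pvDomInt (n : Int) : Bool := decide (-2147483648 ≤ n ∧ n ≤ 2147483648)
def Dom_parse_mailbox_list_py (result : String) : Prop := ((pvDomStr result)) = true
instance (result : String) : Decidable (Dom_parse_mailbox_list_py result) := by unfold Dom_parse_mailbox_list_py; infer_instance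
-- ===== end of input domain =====

-- B re-decomposes A's single stateful pass as grouping-then-field-scan over the same lines; alternative decomposition, same behaviour.

-- ===== PORT A =====
-- line.split(':', 1)[1].strip(); under the startswith guard ':' is present, so index 1 exists (getD default unreachable)
def pvA_val (line : String) : String :=
  PySem.Str.strip (((PySem.Str.splitMax? line ":" 1).getD []).getD 1 "")

def pvA_step (st : List (PySem.Dict String String) × PySem.Dict String String) (line0 : String) :
    List (PySem.Dict String String) × PySem.Dict String String :=
  let line := PySem.Str.strip line0
  if PySem.Str.startswith line "name:" then
    ((if st.2.items = [] then st.1 else st.1 ++ [st.2]),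
      PySem.Dict.ofList [("name", pvA_val line)])
  else if PySem.Str.startswith line "account:" then (st.1, st.2.insert "account" (pvA_val line))
  else if PySem.Str.startswith line "unread:" then (st.1, st.2.insert "unread" (pvA_val line))
  else if PySem.Str.startswith line "total:" then (st.1, st.2.insert "total" (pvA_val line))
  else st

def parse_mailbox_list_py (result : String) : List (List (String × String)) :=
  if result = "" then []
  else
    let lines := (PySem.Str.split? result "\n").getD []
    let st := lines.foldl pvA_step ([], PySem.Dict.empty)
    ((if st.2.items = [] then st.1 else st.1 ++ [st.2]).map (·.items))

-- ===== PORT B =====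
def pvB_val (line : String) : String :=
  PySem.Str.strip (((PySem.Str.splitMax? line ":" 1).getD []).getD 1 "")

def pvB_fields : List (String × String) :=
  [("name", "name:"), ("account", "account:"), ("unread", "unread:"), ("total", "total:")]

def pvB_dictOf (group : List String) : PySem.Dict String String :=
  group.foldl (fun entry ln =>
    pvB_fields.foldl (fun entry kp =>
      if PySem.Str.startswith ln kp.2 then entry.insert kp.1 (pvB_val ln) else entry) entry)
    PySem.Dict.empty

def pvB_groups (lines : List String) : List (List String) :=
  let st := lines.foldl (fun (st : List (List String) × List String) ln =>
    if PySem.Str.startswith ln "name:" then (st.1 ++ [st.2], [ln]) else (st.1, st.2 ++ [ln]))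
    ([], [])
  st.1 ++ [st.2]

def parse_mailbox_list_py_alt (result : String) : List (List (String × String)) :=
  if result = "" then []
  else
    let lines := ((PySem.Str.split? result "\n").getD []).map PySem.Str.strip
    (((pvB_groups lines).map pvB_dictOf).filter (fun d => !d.items.isEmpty)).map (·.items)

-- ===== PRECONDITION & SPEC =====
def Spec_parse_mailbox_list_py (result : String) (out : List (List (String × String))) : Prop := out = parse_mailbox_list_py_alt result
instance (result : String) (out : List (List (String × String))) : Decidable (Spec_parse_mailbox_list_py result out) := by unfold Spec_parse_mailbox_list_py; infer_instance

-- ===== CLAIM (what is proved, stated in full; the proofs are below) =====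
def Claim_equal_parse_mailbox_list_py : Prop := ∀ (result : String), Dom_parse_mailbox_list_py result → Spec_parse_mailbox_list_py result (parse_mailbox_list_py result)

-- ===== LEMMAS AND PROOFS =====

theorem pfx_excl {s p q : List Char} (hp : PySem.Chars.startswith s p = true)
    (hnpq : ¬ p <+: q) (hnqp : ¬ q <+: p) : PySem.Chars.startswith s q = false := by
  by_contra h
  have hq : PySem.Chars.startswith s q = true := by
    cases hb : PySem.Chars.startswith s q with
    | true => rfl
    | false => exact absurd hb h
  rw [PySem.Chars.startswith_iff] at hp hq
  rcases List.prefix_or_prefix_of_prefix hp hq with h1 | h1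
  · exact hnpq h1
  · exact hnqp h1

-- A's step applied to an already-stripped line
def pvA_core (st : List (PySem.Dict String String) × PySem.Dict String String) (line : String) :
    List (PySem.Dict String String) × PySem.Dict String String :=
  if PySem.Str.startswith line "name:" then
    ((if st.2.items = [] then st.1 else st.1 ++ [st.2]),
      PySem.Dict.ofList [("name", pvA_val line)])
  else if PySem.Str.startswith line "account:" then (st.1, st.2.insert "account" (pvA_val line))
  else if PySem.Str.startswith line "unread:" then (st.1, st.2.insert "unread" (pvA_val line))
  else if PySem.Str.startswith line "total:" then (st.1, st.2.insert "total" (pvA_val line))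
  else st

def pvB_gstep (st : List (List String) × List String) (ln : String) :
    List (List String) × List String :=
  if PySem.Str.startswith ln "name:" then (st.1 ++ [st.2], [ln]) else (st.1, st.2 ++ [ln])

-- one line's effect on a group's dict
theorem pvB_dictOf_append (g : List String) (ln : String) :
    pvB_dictOf (g ++ [ln]) =
      pvB_fields.foldl (fun entry kp =>
        if PySem.Str.startswith ln kp.2 then entry.insert kp.1 (pvB_val ln) else entry)
        (pvB_dictOf g) := by
  simp [pvB_dictOf, List.foldl_append]

def pvB_groups_eq (lines : List String) :
    pvB_groups lines = (lines.foldl pvB_gstep ([], [])).1 ++ [(lines.foldl pvB_gstep ([], [])).2] := rfl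

-- the main invariant: A's running state tracks B's grouping state
theorem pv_inv (ls : List String) (mbs : List (PySem.Dict String String))
    (gs : List (List String)) (cur : List String)
    (h : mbs = (gs.map pvB_dictOf).filter (fun d => !d.items.isEmpty)) :
    ls.foldl pvA_core (mbs, pvB_dictOf cur) =
      (((ls.foldl pvB_gstep (gs, cur)).1.map pvB_dictOf).filter (fun d => !d.items.isEmpty),
        pvB_dictOf (ls.foldl pvB_gstep (gs, cur)).2) := by
  induction ls generalizing mbs gs cur with
  | nil => simp [h]
  | cons l ls ih =>
    simp only [List.foldl_cons]
    by_cases hn : PySem.Str.startswith l "name:" = true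
    · simp at hn
      have ha : PySem.Chars.startswith l.toList ['a','c','c','o','u','n','t',':'] = false :=
        pfx_excl hn (by decide) (by decide)
      have hu : PySem.Chars.startswith l.toList ['u','n','r','e','a','d',':'] = false :=
        pfx_excl hn (by decide) (by decide)
      have ht : PySem.Chars.startswith l.toList ['t','o','t','a','l',':'] = false :=
        pfx_excl hn (by decide) (by decide)
      have hstep : pvA_core (mbs, pvB_dictOf cur) l =
          ((if (pvB_dictOf cur).items = [] then mbs else mbs ++ [pvB_dictOf cur]),
            PySem.Dict.ofList [("name", pvA_val l)]) := by
        simp [pvA_core, hn]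
      have hg : pvB_gstep (gs, cur) l = (gs ++ [cur], [l]) := by simp [pvB_gstep, hn]
      rw [hstep, hg]
      have hd1 : pvB_dictOf [l] = PySem.Dict.ofList [("name", pvA_val l)] := by
        simp [pvB_dictOf, pvB_fields, hn, ha, hu, ht, pvA_val, pvB_val,
          PySem.Dict.insert, PySem.Dict.empty, PySem.Dict.ofList, PySem.Dict.contains,
          PySem.Dict.update]
      rw [← hd1]
      apply ih
      by_cases he : (pvB_dictOf cur).items = []
      · simp [he, h, List.filter_append]
      · simp [he, h, List.filter_append]
    · simp at hn
      have hg : pvB_gstep (gs, cur) l = (gs, cur ++ [l]) := by simp [pvB_gstep, hn]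
      rw [hg]
      have hstep : pvA_core (mbs, pvB_dictOf cur) l = (mbs, pvB_dictOf (cur ++ [l])) := by
        rw [pvB_dictOf_append]
        by_cases ha : PySem.Chars.startswith l.toList ['a','c','c','o','u','n','t',':'] = true
        · have hu : PySem.Chars.startswith l.toList ['u','n','r','e','a','d',':'] = false :=
            pfx_excl ha (by decide) (by decide)
          have ht : PySem.Chars.startswith l.toList ['t','o','t','a','l',':'] = false :=
            pfx_excl ha (by decide) (by decide)
          simp [pvA_core, pvB_fields, hn, ha, hu, ht, pvA_val, pvB_val]
        · simp at ha
          by_cases hu : PySem.Chars.startswith l.toList ['u','n','r','e','a','d',':'] = true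
          · have ht : PySem.Chars.startswith l.toList ['t','o','t','a','l',':'] = false :=
              pfx_excl hu (by decide) (by decide)
            simp [pvA_core, pvB_fields, hn, ha, hu, ht, pvA_val, pvB_val]
          · simp only [Bool.not_eq_true] at hu
            by_cases ht : PySem.Chars.startswith l.toList ['t','o','t','a','l',':'] = true
            · simp [pvA_core, pvB_fields, hn, ha, hu, ht, pvA_val, pvB_val]
            · simp only [Bool.not_eq_true] at ht
              simp [pvA_core, pvB_fields, hn, ha, hu, ht, pvA_val, pvB_val]
      rw [hstep]
      exact ih _ _ _ h

-- ===== VERDICT (by name: the statement is the Claim_ definition above) =====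
theorem parse_mailbox_list_py_spec : Claim_equal_parse_mailbox_list_py := by
  intro result _
  unfold Spec_parse_mailbox_list_py parse_mailbox_list_py parse_mailbox_list_py_alt
  by_cases hres : result = ""
  · simp [hres]
  · simp only [hres, ite_false]
    set rawls := (PySem.Str.split? result "\n").getD [] with hraw
    have hA : rawls.foldl pvA_step ([], PySem.Dict.empty) =
        (rawls.map PySem.Str.strip).foldl pvA_core ([], PySem.Dict.empty) := by
      rw [List.foldl_map]
      rfl
    have h0 : pvB_dictOf [] = PySem.Dict.empty := rfl
    have hB := pv_inv (rawls.map PySem.Str.strip) [] [] [] (by simp)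
    rw [h0] at hB
    rw [hA, hB, pvB_groups_eq]
    simp only [List.map_append, List.filter_append]
    by_cases he : (pvB_dictOf ((rawls.map PySem.Str.strip).foldl pvB_gstep ([], [])).2).items = []
    · simp [he]
    · simp [he]
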